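-- pv_equiv track=rewrite | github.com/admin-layout-ai/layout-ai | backend/app/services/layout_validation.py | get_all_rooms_by_types
-- ===== SOURCE A (Python) =====
-- from typing import Dict, Any, List, Optional, Tuple
--
-- def normalize_room_type(room_type: str) -> str:
--     """Normalize room type string for comparison."""
--     if not room_type:
--         return ''
--     return room_type.lower().replace(' ', '_').replace('-', '_')
--
-- def get_all_rooms_by_types(rooms: List[Dict], type_list: List[str]) -> List[Dict]:
--     """Find all rooms matching any of the given types."""
--     result = []
--     for room in rooms:
--         room_type = normalize_room_type(room.get('type', ''))
--         room_name = normalize_room_type(room.get('name', ''))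
--         for t in type_list:
--             if t in room_type or t in room_name:
--                 result.append(room)
--                 break
--     return result
-- ===== SOURCE B (Python) =====
-- from typing import Dict, Any, List, Optional, Tuple
--
-- def _norm(s: str) -> str:
--     return s.lower().replace(' ', '_').replace('-', '_') if s else ''
--
-- def get_all_rooms_by_types(rooms: List[Dict], type_list: List[str]) -> List[Dict]:
--     """Find all rooms matching any of the given types (pattern-major scan over an index set)."""
--     keys = [(_norm(r.get('type', '')), _norm(r.get('name', ''))) for r in rooms]
--     matched = set()
--     for t in dict.fromkeys(type_list):
--         for i, (rt, rn) in enumerate(keys):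
--             if i not in matched and (t in rt or t in rn):
--                 matched.add(i)
--     return [r for i, r in enumerate(rooms) if i in matched]
-- ===== Notes on version B (the rewrite author's own statement) =====
-- stated objective: alternative
-- what changed: B inverts the loop nesting: it precomputes each room's normalized (type,name) key once, scans the deduplicated pattern list over that key list collecting the set of matching room indices, then emits the rooms whose index is in the set, instead of A's room-major scan over the pattern list with break.
import Mathlib
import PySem

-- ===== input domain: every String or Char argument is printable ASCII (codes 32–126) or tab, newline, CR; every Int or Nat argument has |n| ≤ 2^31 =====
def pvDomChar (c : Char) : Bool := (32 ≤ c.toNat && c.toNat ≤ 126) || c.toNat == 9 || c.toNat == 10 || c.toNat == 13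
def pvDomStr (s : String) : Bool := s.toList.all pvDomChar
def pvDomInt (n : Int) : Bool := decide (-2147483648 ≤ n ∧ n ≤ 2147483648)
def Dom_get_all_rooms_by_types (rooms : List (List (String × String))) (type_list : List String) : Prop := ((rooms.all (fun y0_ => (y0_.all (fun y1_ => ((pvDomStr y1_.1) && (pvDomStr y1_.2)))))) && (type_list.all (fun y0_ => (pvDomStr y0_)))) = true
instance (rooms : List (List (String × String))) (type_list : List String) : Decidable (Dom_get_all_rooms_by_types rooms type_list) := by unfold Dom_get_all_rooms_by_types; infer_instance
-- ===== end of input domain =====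

-- B inverts the loop nesting (pattern-major scan over precomputed normalized keys into an index set)
-- instead of A's room-major scan with break; same cost, genuinely different traversal (objective: alternative).


-- ===== PORT A =====
-- normalize_room_type
def pvNormA (room_type : String) : String :=
  if room_type = "" then ""
  else PySem.Str.replace (PySem.Str.replace (PySem.Str.lower room_type) " " "_") "-" "_"

-- A's inner 'for t in type_list: … break'
def pvMatchLoop (room_type room_name : String) : List String → Bool
  | [] => false
  | t :: ts =>
      if PySem.Str.isIn t room_type || PySem.Str.isIn t room_name then true
      else pvMatchLoop room_type room_name ts

def get_all_rooms_by_types (rooms : List (List (String × String))) (type_list : List String) : List (List (String × String)) :=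
  rooms.foldl (fun result room =>
    let room_type := pvNormA (PySem.Dict.getD (PySem.Dict.mk room) "type" "")
    let room_name := pvNormA (PySem.Dict.getD (PySem.Dict.mk room) "name" "")
    if pvMatchLoop room_type room_name type_list then result ++ [room] else result) []

-- ===== PORT B =====
-- _norm
def pvNormB (s : String) : String :=
  if s = "" then ""
  else PySem.Str.replace (PySem.Str.replace (PySem.Str.lower s) " " "_") "-" "_"

def pvKeyB (room : List (String × String)) : String × String :=
  (pvNormB (PySem.Dict.getD (PySem.Dict.mk room) "type" ""),
   pvNormB (PySem.Dict.getD (PySem.Dict.mk room) "name" ""))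

def get_all_rooms_by_types_alt (rooms : List (List (String × String))) (type_list : List String) : List (List (String × String)) :=
  let keys := rooms.map pvKeyB
  let matched : PySem.Set Int :=
    (PySem.List.dedup type_list).foldl (fun m t =>
      (PySem.List.enumerate keys).foldl (fun m p =>
        if !(PySem.Set.contains m p.1) && (PySem.Str.isIn t p.2.1 || PySem.Str.isIn t p.2.2)
        then PySem.Set.add m p.1 else m) m) PySem.Set.empty
  ((PySem.List.enumerate rooms).filter (fun p => PySem.Set.contains matched p.1)).map (·.2)

-- ===== PRECONDITION & SPEC =====
def Spec_get_all_rooms_by_types (rooms : List (List (String × String))) (type_list : List String) (out : List (List (String × String))) : Prop := out = get_all_rooms_by_types_alt rooms type_list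
instance (rooms : List (List (String × String))) (type_list : List String) (out : List (List (String × String))) : Decidable (Spec_get_all_rooms_by_types rooms type_list out) := by unfold Spec_get_all_rooms_by_types; infer_instance

-- ===== CLAIM (what is proved, stated in full; the proofs are below) =====
def Claim_equal_get_all_rooms_by_types : Prop := ∀ (rooms : List (List (String × String))) (type_list : List String), Dom_get_all_rooms_by_types rooms type_list → Spec_get_all_rooms_by_types rooms type_list (get_all_rooms_by_types rooms type_list)

-- ===== LEMMAS AND PROOFS =====

-- the per-room match condition both programs decide
def pvCond (t : String) (key : String × String) : Bool :=
  PySem.Str.isIn t key.1 || PySem.Str.isIn t key.2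

lemma pvMatchLoop_eq_any (rt rn : String) (ts : List String) :
    pvMatchLoop rt rn ts = ts.any (fun t => pvCond t (rt, rn)) := by
  induction ts with
  | nil => rfl
  | cons t ts ih => simp [pvMatchLoop, pvCond, ih]

lemma pvA_eq_filter (rooms : List (List (String × String))) (tl : List String) :
    get_all_rooms_by_types rooms tl
      = rooms.filter (fun room => pvMatchLoop (pvKeyB room).1 (pvKeyB room).2 tl) := by
  unfold get_all_rooms_by_types
  rw [PySem.List.foldl_append_if_eq_filter]
  rfl

-- inner fold of B: membership after scanning one pattern over the enumerated keys
lemma pvInner_mem (t : String) (L : List (Int × (String × String))) (m : PySem.Set Int) (i : Int) :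
    i ∈ L.foldl (fun m p =>
        if !(PySem.Set.contains m p.1) && (PySem.Str.isIn t p.2.1 || PySem.Str.isIn t p.2.2)
        then PySem.Set.add m p.1 else m) m
      ↔ i ∈ m ∨ ∃ p ∈ L, p.1 = i ∧ pvCond t p.2 = true := by
  induction L generalizing m with
  | nil => simp
  | cons p L ih =>
      simp only [List.foldl_cons]
      rw [ih]
      have hm' : i ∈ (if (!PySem.Set.contains m p.1 && (PySem.Str.isIn t p.2.1 || PySem.Str.isIn t p.2.2)) = true
            then PySem.Set.add m p.1 else m)
          ↔ i ∈ m ∨ (p.1 = i ∧ pvCond t p.2 = true) := by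
        split_ifs with h
        · rw [PySem.Set.mem_add]
          simp only [Bool.and_eq_true, Bool.not_eq_true'] at h
          constructor
          · rintro (h1 | rfl)
            · exact Or.inl h1
            · exact Or.inr ⟨rfl, by simpa [pvCond] using h.2⟩
          · rintro (h1 | ⟨rfl, _⟩)
            · exact Or.inl h1
            · exact Or.inr rfl
        · constructor
          · exact Or.inl
          · rintro (h1 | ⟨rfl, hcond⟩)
            · exact h1
            · have hct : PySem.Set.contains m p.1 = true := by
                by_contra hm
                refine h ?_
                simp only [Bool.and_eq_true, Bool.not_eq_true']
                exact ⟨Bool.not_eq_true _ ▸ hm, by simpa [pvCond] using hcond⟩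
              exact (PySem.Set.contains_iff m p.1).mp hct
      rw [hm']
      constructor
      · rintro ((h1 | ⟨rfl, hc⟩) | ⟨q, hq, h1, h2⟩)
        · exact Or.inl h1
        · exact Or.inr ⟨p, List.mem_cons_self, rfl, hc⟩
        · exact Or.inr ⟨q, List.mem_cons_of_mem _ hq, h1, h2⟩
      · rintro (h1 | ⟨q, hq, h1, h2⟩)
        · exact Or.inl (Or.inl h1)
        · rcases List.mem_cons.mp hq with rfl | hq
          · exact Or.inl (Or.inr ⟨h1, h2⟩)
          · exact Or.inr ⟨q, hq, h1, h2⟩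

-- outer fold of B: membership after scanning all patterns, from any initial set
lemma pvOuter_mem (tl : List String) (L : List (Int × (String × String))) (m : PySem.Set Int) (i : Int) :
    i ∈ tl.foldl (fun m t =>
        L.foldl (fun m p =>
          if !(PySem.Set.contains m p.1) && (PySem.Str.isIn t p.2.1 || PySem.Str.isIn t p.2.2)
          then PySem.Set.add m p.1 else m) m) m
      ↔ i ∈ m ∨ ∃ t ∈ tl, ∃ p ∈ L, p.1 = i ∧ pvCond t p.2 = true := by
  induction tl generalizing m with
  | nil => simp
  | cons t ts ih =>
      simp only [List.foldl_cons]
      rw [ih, pvInner_mem]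
      simp only [List.mem_cons, or_and_right, exists_or, exists_eq_left, or_assoc]

-- membership in B's final matched set
lemma pvMatched_mem (tl : List String) (L : List (Int × (String × String))) (i : Int) :
    i ∈ tl.foldl (fun m t =>
        L.foldl (fun m p =>
          if !(PySem.Set.contains m p.1) && (PySem.Str.isIn t p.2.1 || PySem.Str.isIn t p.2.2)
          then PySem.Set.add m p.1 else m) m) PySem.Set.empty
      ↔ ∃ t ∈ tl, ∃ p ∈ L, p.1 = i ∧ pvCond t p.2 = true := by
  rw [pvOuter_mem]
  simp [PySem.Set.empty]

-- filtering an enumerated list by an index predicate = filtering the list itself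
lemma pvEnum_filter {α : Type} (l : List α) (s : Int) (f : Int → Bool) (P : α → Bool)
    (h : ∀ (k : Nat) (hk : k < l.length), f (s + k) = P l[k]) :
    ((PySem.List.enumerate l s).filter (fun p => f p.1)).map (·.2) = l.filter P := by
  induction l generalizing s with
  | nil => simp [PySem.List.enumerate_nil]
  | cons x xs ih =>
      rw [PySem.List.enumerate_cons]
      have h0 : f s = P x := by simpa using h 0 (by simp)
      have hrec := ih (s + 1) (fun k hk => by
        have := h (k + 1) (by simpa using Nat.succ_lt_succ hk)
        simpa [add_assoc, add_comm, add_left_comm] using this)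
      by_cases hp : P x = true <;> simp [h0, hp, hrec]

theorem pv_main : ∀ (rooms : List (List (String × String))) (type_list : List String),
    get_all_rooms_by_types rooms type_list = get_all_rooms_by_types_alt rooms type_list := by
  intro rooms tl
  rw [pvA_eq_filter]
  unfold get_all_rooms_by_types_alt
  refine Eq.symm (pvEnum_filter rooms 0 _ _ ?_)
  intro k hk
  rw [pvMatchLoop_eq_any, Bool.eq_iff_iff, PySem.Set.contains_iff, pvMatched_mem, List.any_eq_true]
  constructor
  · rintro ⟨t, ht, p, hp, hpi, hcond⟩
    obtain ⟨j, hj, rfl⟩ := (PySem.List.mem_enumerate_iff _ _ _).mp hp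
    have hjk : j = k := by
      have h0 : ((j : Int)) = (k : Int) := by simpa using hpi
      exact_mod_cast h0
    subst hjk
    refine ⟨t, (PySem.List.mem_dedup _ _).mp ht, ?_⟩
    simp only [List.getElem_map] at hcond
    simpa [pvCond] using hcond
  · rintro ⟨t, ht, hcond⟩
    refine ⟨t, (PySem.List.mem_dedup _ _).mpr ht,
      ((0 : Int) + k, (rooms.map pvKeyB)[k]'(by simpa using hk)), ?_, rfl, ?_⟩
    · exact (PySem.List.mem_enumerate_iff _ _ _).mpr ⟨k, by simpa using hk, rfl⟩
    · simp only [List.getElem_map]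
      simpa [pvCond] using hcond

-- ===== VERDICT (by name: the statement is the Claim_ definition above) =====
theorem get_all_rooms_by_types_spec : Claim_equal_get_all_rooms_by_types := by
  intro rooms tl _
  unfold Spec_get_all_rooms_by_types
  exact pv_main rooms tl
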